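-- pv_equiv track=rewrite | github.com/gomanish/Python | array/Flipping_an_image.py | fliping
-- ===== SOURCE A (Python) =====
-- def fliping(x):
--     # x is a matrix
--     for row in range(len(x)):
--         for element in range(len(x[row])):
--             if x[row][element]==0:
--                 x[row][element]=1
--             else:
--                 x[row][element]=0
--         x[row]=x[row][::-1]
--     return(x)
-- ===== SOURCE B (Python) =====
-- def fliping(x):
--     # Same return value as A (and same in-place row rebinding); one fused pass
--     # per row builds the inverted row back-to-front instead of invert-then-slice.
--     for r in range(len(x)):
--         flipped = []
--         for v in x[r]:
--             flipped.insert(0, 0 if v else 1)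
--         x[r] = flipped
--     return x
-- ===== Notes on version B (the rewrite author's own statement) =====
-- stated objective: alternative
-- what changed: Each row is produced in a single pass that prepends the inverted element (building the reversed row back-to-front), instead of A's two passes that first invert every element in place and then replace the row by a reversed slice copy.
import Mathlib
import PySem

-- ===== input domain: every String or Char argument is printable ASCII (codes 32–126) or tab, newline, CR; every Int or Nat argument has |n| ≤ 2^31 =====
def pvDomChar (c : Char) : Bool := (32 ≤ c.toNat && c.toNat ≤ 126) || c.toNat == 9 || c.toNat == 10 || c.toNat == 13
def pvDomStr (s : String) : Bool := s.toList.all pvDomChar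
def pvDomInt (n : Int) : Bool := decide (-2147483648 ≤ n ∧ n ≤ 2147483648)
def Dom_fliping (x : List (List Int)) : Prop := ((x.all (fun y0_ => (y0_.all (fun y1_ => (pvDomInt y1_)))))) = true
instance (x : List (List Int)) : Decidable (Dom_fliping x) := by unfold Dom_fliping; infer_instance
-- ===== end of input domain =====

-- B builds each inverted row back-to-front in one pass instead of A's invert-in-place pass
-- followed by a reversed-slice copy; equivalence is about the RETURN value (both also
-- rebind each row of the argument, A additionally mutates row elements in place first).

-- ===== PORT A =====
-- inner index loop sets x[row][element] := (1 if ==0 else 0), i.e. a map over the row;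
-- then x[row] = x[row][::-1] (slice? with step -1; always some for step ≠ 0, default never used)
def fliping (x : List (List Int)) : List (List Int) :=
  x.map (fun row =>
    let inverted := row.map (fun e => if e = 0 then 1 else 0)
    (PySem.List.slice? inverted none none (-1)).getD [])

-- ===== PORT B =====
-- per-row single pass: flipped.insert(0, 0 if v else 1) is a cons onto the accumulator
def fliping_alt (x : List (List Int)) : List (List Int) :=
  x.map (fun row => row.foldl (fun acc v => (if v ≠ 0 then 0 else 1) :: acc) ([] : List Int))

-- ===== PRECONDITION & SPEC =====
def Spec_fliping (x : List (List Int)) (out : List (List Int)) : Prop := out = fliping_alt x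
instance (x : List (List Int)) (out : List (List Int)) : Decidable (Spec_fliping x out) := by unfold Spec_fliping; infer_instance

-- ===== CLAIM (what is proved, stated in full; the proofs are below) =====
def Claim_equal_fliping : Prop := ∀ (x : List (List Int)), Dom_fliping x → Spec_fliping x (fliping x)

-- ===== LEMMAS AND PROOFS =====
theorem foldl_cons_rev {α β : Type} (f : α → β) (l : List α) (acc : List β) :
    l.foldl (fun acc v => f v :: acc) acc = (l.map f).reverse ++ acc := by
  induction l generalizing acc with
  | nil => simp
  | cons a t ih => simp [List.foldl, ih]

theorem row_eq (row : List Int) :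
    (PySem.List.slice? (row.map (fun e => if e = 0 then 1 else 0)) none none (-1)).getD [] =
      row.foldl (fun acc v => (if v ≠ 0 then 0 else 1) :: acc) ([] : List Int) := by
  rw [PySem.List.slice?_none_none_neg_one, foldl_cons_rev (fun v : Int => if v ≠ 0 then 0 else 1)]
  simp only [Option.getD_some, List.append_nil]
  congr 1
  apply List.map_congr_left
  intro a _
  by_cases h : a = 0 <;> simp [h]

-- ===== VERDICT (by name: the statement is the Claim_ definition above) =====
theorem fliping_spec : Claim_equal_fliping := by
  intro x _
  unfold Spec_fliping fliping fliping_alt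
  exact List.map_congr_left (fun row _ => row_eq row)
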